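-- pv_equiv track=rewrite | github.com/peterkisfaludi/Codility | Future-Learning/strsymmetrypoint.py | solution
-- ===== SOURCE A (Python) =====
-- def solution(S):
--     # write your code in Python 2.7
--     N=len(S)
--
--     if N%2==0:
--         return -1
--
--     mid=N//2
--     cnt=mid
--
--     while cnt>0:
--         if S[mid-cnt]!=S[mid+cnt]:
--             return -1
--         cnt-=1
--
--     return mid
-- ===== SOURCE B (Python) =====
-- def solution(S):
--     N = len(S)
--     if N % 2 == 0:
--         return -1
--     return N // 2 if S == S[::-1] else -1
-- ===== Notes on version B (the rewrite author's own statement) =====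
-- stated objective: idiomatic
-- what changed: Replaces the index-offset while-loop scanning mirror pairs around the midpoint with a single whole-string comparison against its reversal (S == S[::-1]), keeping the even-length guard.
import Mathlib
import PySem

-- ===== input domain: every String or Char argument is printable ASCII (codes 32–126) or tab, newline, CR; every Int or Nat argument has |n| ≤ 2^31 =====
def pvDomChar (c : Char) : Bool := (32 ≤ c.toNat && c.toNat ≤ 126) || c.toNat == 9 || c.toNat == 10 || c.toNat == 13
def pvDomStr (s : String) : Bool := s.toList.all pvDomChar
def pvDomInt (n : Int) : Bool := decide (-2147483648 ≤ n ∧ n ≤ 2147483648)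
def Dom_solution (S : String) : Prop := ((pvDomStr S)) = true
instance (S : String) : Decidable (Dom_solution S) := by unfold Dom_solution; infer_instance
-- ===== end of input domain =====

-- B replaces A's index-offset mirror-pair loop by a whole-string comparison with its reversal (same O(n) cost).

-- ===== PORT A =====
-- the while-loop: cnt counts down from mid to 1
def solLoopA (S : String) (mid : Int) : Nat → Int
  | 0 => mid
  | k + 1 =>
      if PySem.Str.pyGet? S (mid - ((k : Int) + 1)) ≠ PySem.Str.pyGet? S (mid + ((k : Int) + 1)) then -1
      else solLoopA S mid k

def solution (S : String) : Int :=
  let N : Int := PySem.Str.len S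
  if PySem.Int.mod N 2 = 0 then -1
  else
    let mid : Int := PySem.Int.floordiv N 2
    solLoopA S mid mid.toNat

-- ===== PORT B =====
def solution_alt (S : String) : Int :=
  let N : Int := PySem.Str.len S
  if PySem.Int.mod N 2 = 0 then -1
  else
    match PySem.Str.slice? S none none (-1) with
    | some r => if S = r then PySem.Int.floordiv N 2 else -1
    | none => -1   -- unreachable: step -1 never raises

-- ===== PRECONDITION & SPEC =====
def Spec_solution (S : String) (out : Int) : Prop := out = solution_alt S
instance (S : String) (out : Int) : Decidable (Spec_solution S out) := by unfold Spec_solution; infer_instance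

-- ===== CLAIM (what is proved, stated in full; the proofs are below) =====
def Claim_equal_solution : Prop := ∀ (S : String), Dom_solution S → Spec_solution S (solution S)

-- ===== LEMMAS AND PROOFS =====

-- the loop returns mid iff all mirror pairs with offset 1..c agree, else -1
lemma solLoopA_eq (S : String) (mid : Int) (c : Nat) :
    solLoopA S mid c =
      if ∀ k < c, PySem.Str.pyGet? S (mid - ((k : Int) + 1)) = PySem.Str.pyGet? S (mid + ((k : Int) + 1))
      then mid else -1 := by
  induction c with
  | zero => simp [solLoopA]
  | succ k ih =>
    rw [solLoopA]
    by_cases h : PySem.Str.pyGet? S (mid - ((k : Int) + 1)) = PySem.Str.pyGet? S (mid + ((k : Int) + 1))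
    · simp only [h, ne_eq, not_true_eq_false, if_false, ih]
      by_cases hall : ∀ j < k, PySem.Str.pyGet? S (mid - ((j : Int) + 1)) = PySem.Str.pyGet? S (mid + ((j : Int) + 1))
      · rw [if_pos hall, if_pos]
        intro j hj
        rcases Nat.lt_succ_iff_lt_or_eq.mp hj with hj' | hj'
        · exact hall j hj'
        · subst hj'; exact h
      · rw [if_neg hall, if_neg]
        intro hall'
        exact hall fun j hj => hall' j (Nat.lt_succ_of_lt hj)
    · rw [if_pos h, if_neg]
      intro hall'
      exact h (hall' k (Nat.lt_succ_self k))

-- mirror-pair condition ↔ list equals its reverse, for odd length 2m+1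
lemma pairs_iff_palindrome (l : List Char) (m : Nat) (hn : l.length = 2 * m + 1) :
    (∀ k < m, PySem.List.pyGet? l ((m : Int) - ((k : Int) + 1)) = PySem.List.pyGet? l ((m : Int) + ((k : Int) + 1)))
      ↔ l = l.reverse := by
  constructor
  · intro h
    apply List.ext_getElem?
    intro i
    by_cases hi : i < l.length
    · rw [List.getElem?_reverse hi]
      rcases lt_trichotomy i m with him | him | him
      · have hk := h (m - i - 1) (by omega)
        have e1 : (m : Int) - (((m - i - 1 : Nat) : Int) + 1) = ((i : Nat) : Int) := by omega
        have e2 : (m : Int) + (((m - i - 1 : Nat) : Int) + 1) = (((2 * m - i : Nat)) : Int) := by omega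
        rw [e1, e2, PySem.List.pyGet?_natCast, PySem.List.pyGet?_natCast] at hk
        rw [show l.length - 1 - i = 2 * m - i from by omega]
        exact hk
      · rw [show l.length - 1 - i = i from by omega]
      · have hk := h (i - m - 1) (by omega)
        have e1 : (m : Int) - (((i - m - 1 : Nat) : Int) + 1) = (((2 * m - i : Nat)) : Int) := by omega
        have e2 : (m : Int) + (((i - m - 1 : Nat) : Int) + 1) = ((i : Nat) : Int) := by omega
        rw [e1, e2, PySem.List.pyGet?_natCast, PySem.List.pyGet?_natCast] at hk
        rw [show l.length - 1 - i = 2 * m - i from by omega]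
        exact hk.symm
    · rw [List.getElem?_eq_none (by omega), List.getElem?_eq_none (by simp; omega)]
  · intro hpal k hk
    have e1 : (m : Int) - ((k : Int) + 1) = (((m - k - 1 : Nat)) : Int) := by omega
    have e2 : (m : Int) + ((k : Int) + 1) = (((m + k + 1 : Nat)) : Int) := by omega
    rw [e1, e2, PySem.List.pyGet?_natCast, PySem.List.pyGet?_natCast]
    conv_lhs => rw [hpal]
    rw [List.getElem?_reverse (by omega)]
    rw [show l.length - 1 - (m - k - 1) = m + k + 1 from by omega]

-- ===== VERDICT (by name: the statement is the Claim_ definition above) =====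
theorem solution_spec : Claim_equal_solution := by
  intro S _
  show solution S = solution_alt S
  unfold solution solution_alt
  simp only [PySem.Str.len_eq]
  set l := S.toList with hl
  set n := l.length with hn
  by_cases hpar : PySem.Int.mod (n : Int) 2 = 0
  · rw [if_pos hpar, if_pos hpar]
  · rw [if_neg hpar, if_neg hpar]
    -- n is odd
    have hmod : PySem.Int.mod (n : Int) 2 = ((n % 2 : Nat) : Int) := PySem.Int.mod_natCast n 2
    have hodd : n % 2 = 1 := by
      rcases Nat.mod_two_eq_zero_or_one n with h | h
      · exfalso; apply hpar; rw [hmod, h]; rfl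
      · exact h
    obtain ⟨m, hm⟩ : ∃ m, n = 2 * m + 1 := ⟨n / 2, by omega⟩
    have hdiv0 : PySem.Int.floordiv (n : Int) 2 = ((n / 2 : Nat) : Int) := PySem.Int.floordiv_natCast n 2
    have hdiv : PySem.Int.floordiv (n : Int) 2 = ((m : Nat) : Int) := by
      rw [hdiv0]; norm_cast; omega
    rw [hdiv]
    have htoNat : ((m : Nat) : Int).toNat = m := by simp
    rw [htoNat, solLoopA_eq]
    rw [PySem.Str.slice?_none_none_neg_one]
    have hget : ∀ i : Int, PySem.Str.pyGet? S i = PySem.List.pyGet? l i := by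
      intro i; simp [PySem.Str.pyGet?, hl]
    have hSeq : (S = String.ofList l.reverse) ↔ (l = l.reverse) := by
      constructor
      · intro h
        calc l = S.toList := hl
          _ = l.reverse := by rw [h]; simp
      · intro h
        rw [← h]
        show S = String.ofList S.toList
        simp
    simp only [hget]
    by_cases hp : l = l.reverse
    · rw [if_pos (fun k hk => (pairs_iff_palindrome l m (by omega)).mpr hp k hk),
          if_pos (hSeq.mpr hp)]
    · rw [if_neg (fun hc => hp ((pairs_iff_palindrome l m (by omega)).mp hc)),
          if_neg (fun h => hp (hSeq.mp h))]
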